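-- pv_equiv track=rewrite | github.com/albertomarfoglia/meds-to-owl-examples | NEUROVASC/utils/metrics.py | _count_recursive_using_index
-- ===== SOURCE A (Python) =====
-- def _count_recursive_using_index(subject, adjacency, subject_triple_counts):
--     """
--     Iterative DFS using the pre-built adjacency and subject_triple_counts.
--     Counts each subject's outgoing triples once. Avoids repeated graph queries.
--     """
--     stack = [subject]
--     visited = set()
--     total = 0
--
--     while stack:
--         node = stack.pop()
--         if node in visited:
--             continue
--         visited.add(node)
--
--         # add the number of outgoing triples for this node (0 if none)
--         total += subject_triple_counts.get(node, 0)
--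
--         # push neighbors (only URIRef neighbors were stored)
--         for neigh in adjacency.get(node, ()):
--             if neigh not in visited:
--                 stack.append(neigh)
--
--     return total
-- ===== SOURCE B (Python) =====
-- def _count_recursive_using_index(subject, adjacency, subject_triple_counts):
--     # BFS with an index pointer: collect the reachable nodes (deduplicated at
--     # enqueue time) in discovery order, then sum their triple counts once.
--     order = [subject]
--     seen = {subject}
--     i = 0
--     while i < len(order):
--         for neigh in adjacency.get(order[i], ()):
--             if neigh not in seen:
--                 seen.add(neigh)
--                 order.append(neigh)
--         i += 1
--     return sum(subject_triple_counts.get(node, 0) for node in order)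
-- ===== Notes on version B (the rewrite author's own statement) =====
-- stated objective: alternative
-- what changed: Replaces the LIFO stack DFS that pushes duplicates and re-checks visited on pop with an index-pointer BFS queue that deduplicates at enqueue time and sums the counts in a separate final pass; the total is order-independent, so the value is identical.
import Mathlib
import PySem

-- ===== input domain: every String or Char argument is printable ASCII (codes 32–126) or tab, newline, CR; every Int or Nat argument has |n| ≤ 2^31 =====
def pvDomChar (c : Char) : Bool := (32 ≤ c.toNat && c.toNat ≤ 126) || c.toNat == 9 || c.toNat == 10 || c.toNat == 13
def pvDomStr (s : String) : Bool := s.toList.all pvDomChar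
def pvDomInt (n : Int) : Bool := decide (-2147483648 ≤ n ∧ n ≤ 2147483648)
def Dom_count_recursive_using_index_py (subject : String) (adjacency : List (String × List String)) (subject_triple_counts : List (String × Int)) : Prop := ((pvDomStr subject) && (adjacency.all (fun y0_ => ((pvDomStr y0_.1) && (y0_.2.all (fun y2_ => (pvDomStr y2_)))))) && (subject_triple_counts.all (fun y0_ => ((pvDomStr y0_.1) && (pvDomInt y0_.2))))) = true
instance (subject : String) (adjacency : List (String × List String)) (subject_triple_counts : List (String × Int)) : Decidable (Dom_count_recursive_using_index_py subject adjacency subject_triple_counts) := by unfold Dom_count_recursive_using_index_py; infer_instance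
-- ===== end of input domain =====

-- B replaces A's LIFO stack DFS (duplicates pushed, visited re-checked on pop) by an
-- index-pointer BFS queue deduplicated at enqueue time with a separate final summing
-- pass; same value (alternative decomposition, not claimed faster).


-- shared with the proofs: adjacency.get(node, ()) and subject_triple_counts.get(node, 0)
def pvNbrs (adjacency : List (String × List String)) (a : String) : List String :=
  PySem.Dict.getD (PySem.Dict.mk adjacency) a []

def pvCnt (subject_triple_counts : List (String × Int)) (a : String) : Int :=
  PySem.Dict.getD (PySem.Dict.mk subject_triple_counts) a 0

-- ===== PORT A =====
-- The stack is modelled with its TOP AT THE HEAD (Python pops from the end, so pushing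
-- the neighbour list left-to-right means they pop in REVERSED order, hence `.reverse`).
-- The fuel argument is only a totality guard; the proof shows it never runs out.
def pvLoopA (adjacency : List (String × List String)) (subject_triple_counts : List (String × Int)) :
    Nat → List String → PySem.Set String → Int → Int
  | 0, _, _, total => total
  | fuel + 1, stack, visited, total =>
    match stack with
    | [] => total
    | node :: rest =>
      if node ∈ visited then
        pvLoopA adjacency subject_triple_counts fuel rest visited total
      else
        let visited' := PySem.Set.add visited node
        let total' := total + pvCnt subject_triple_counts node
        let pushed := ((pvNbrs adjacency node).filter
          (fun m => !(PySem.Set.contains visited' m))).reverse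
        pvLoopA adjacency subject_triple_counts fuel (pushed ++ rest) visited' total'

def count_recursive_using_index_py (subject : String) (adjacency : List (String × List String)) (subject_triple_counts : List (String × Int)) : Int :=
  pvLoopA adjacency subject_triple_counts
    (1 + (adjacency.map (fun p => p.2.length)).sum) [subject] PySem.Set.empty 0

-- ===== PORT B =====
-- Index-pointer BFS queue: `order` holds the discovered nodes in discovery order,
-- `seen` the same nodes as a set; one final pass sums the counts.
-- The fuel argument is only a totality guard; the proof shows it never runs out.
def pvLoopB (adjacency : List (String × List String)) :
    Nat → List String → PySem.Set String → Nat → List String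
  | 0, order, _, _ => order
  | fuel + 1, order, seen, i =>
    if h : i < order.length then
      let st := (pvNbrs adjacency order[i]).foldl
        (fun (os : List String × PySem.Set String) m =>
          if PySem.Set.contains os.2 m then os else (os.1 ++ [m], PySem.Set.add os.2 m))
        (order, seen)
      pvLoopB adjacency fuel st.1 st.2 (i + 1)
    else order

def count_recursive_using_index_py_alt (subject : String) (adjacency : List (String × List String)) (subject_triple_counts : List (String × Int)) : Int :=
  ((pvLoopB adjacency (1 + 2 * (adjacency.map (fun p => p.2.length)).sum)
      [subject] (PySem.Set.ofList [subject]) 0).map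
    (pvCnt subject_triple_counts)).sum

-- ===== PRECONDITION & SPEC =====
def Spec_count_recursive_using_index_py (subject : String) (adjacency : List (String × List String)) (subject_triple_counts : List (String × Int)) (out : Int) : Prop := out = count_recursive_using_index_py_alt subject adjacency subject_triple_counts
instance (subject : String) (adjacency : List (String × List String)) (subject_triple_counts : List (String × Int)) (out : Int) : Decidable (Spec_count_recursive_using_index_py subject adjacency subject_triple_counts out) := by unfold Spec_count_recursive_using_index_py; infer_instance

-- ===== CLAIM (what is proved, stated in full; the proofs are below) =====
def Claim_equal_count_recursive_using_index_py : Prop := ∀ (subject : String) (adjacency : List (String × List String)) (subject_triple_counts : List (String × Int)), Dom_count_recursive_using_index_py subject adjacency subject_triple_counts → Spec_count_recursive_using_index_py subject adjacency subject_triple_counts (count_recursive_using_index_py subject adjacency subject_triple_counts)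

-- ===== LEMMAS AND PROOFS =====

def pvFlat (adjacency : List (String × List String)) : List String :=
  (adjacency.map Prod.snd).flatten

def pvStep (adjacency : List (String × List String)) (V : String → Prop) (a b : String) : Prop :=
  b ∈ pvNbrs adjacency a ∧ ¬ V b

def pvPot (adjacency : List (String × List String)) (V : PySem.Set String) : Nat :=
  (adjacency.map (fun p => if p.1 ∈ V then 0 else p.2.length)).sum

lemma pvNbrs_subset_flat {adjacency : List (String × List String)} {a x : String}
    (h : x ∈ pvNbrs adjacency a) : x ∈ pvFlat adjacency := by
  induction adjacency with
  | nil => simp [pvNbrs, PySem.Dict.getD, PySem.Dict.get?] at h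
  | cons p tl ih =>
    obtain ⟨k, vs⟩ := p
    rw [pvNbrs, PySem.Dict.getD_eq_get?_getD, PySem.Dict.get?_mk_cons] at h
    by_cases hk : k == a
    · simp [hk] at h
      simp [pvFlat]
      exact Or.inl h
    · simp [hk] at h
      have := ih (by rw [pvNbrs, PySem.Dict.getD_eq_get?_getD]; exact h)
      simp [pvFlat] at this ⊢
      exact Or.inr this

lemma pvRTG_mono {adjacency : List (String × List String)} {V V' : String → Prop}
    (h : ∀ y, V y → V' y) {w x : String}
    (hr : Relation.ReflTransGen (pvStep adjacency V') w x) :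
    Relation.ReflTransGen (pvStep adjacency V) w x :=
  Relation.ReflTransGen.mono (fun _ b hb => ⟨hb.1, fun hv => hb.2 (h b hv)⟩) hr

lemma pvThrough {adjacency : List (String × List String)} {V M : String → Prop} {w x : String}
    (h : Relation.ReflTransGen (pvStep adjacency V) w x) :
    Relation.ReflTransGen (pvStep adjacency (fun y => V y ∨ M y)) w x ∨
      ∃ m, M m ∧ Relation.ReflTransGen (pvStep adjacency (fun y => V y ∨ M y)) m x := by
  induction h using Relation.ReflTransGen.head_induction_on with
  | refl => exact Or.inl Relation.ReflTransGen.refl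
  | head hstep _ ih =>
    rename_i a c _
    rcases ih with ih | ih
    · by_cases hm : M c
      · exact Or.inr ⟨c, hm, ih⟩
      · exact Or.inl (Relation.ReflTransGen.head ⟨hstep.1, fun hh => hh.elim hstep.2 hm⟩ ih)
    · exact Or.inr ih

lemma pvPot_mono {adjacency : List (String × List String)} {V V' : PySem.Set String}
    (h : ∀ y, y ∈ V → y ∈ V') : pvPot adjacency V' ≤ pvPot adjacency V := by
  induction adjacency with
  | nil => simp [pvPot]
  | cons p tl ih =>
    simp only [pvPot, List.map_cons, List.sum_cons] at ih ⊢
    have : (if p.1 ∈ V' then 0 else p.2.length) ≤ (if p.1 ∈ V then 0 else p.2.length) := by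
      by_cases hv : p.1 ∈ V
      · simp [hv, h _ hv]
      · split <;> omega
    omega

lemma pvPot_drop {adjacency : List (String × List String)} {V : PySem.Set String} {n : String}
    (hn : n ∉ V) :
    (pvNbrs adjacency n).length + pvPot adjacency (PySem.Set.add V n) ≤ pvPot adjacency V := by
  induction adjacency with
  | nil => simp [pvNbrs, pvPot, PySem.Dict.getD, PySem.Dict.get?]
  | cons p tl ih =>
    obtain ⟨k, vs⟩ := p
    have hmem : ∀ y, y ∈ PySem.Set.add V n ↔ y ∈ V ∨ y = n := fun y => PySem.Set.mem_add V n y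
    rw [pvNbrs, PySem.Dict.getD_eq_get?_getD, PySem.Dict.get?_mk_cons]
    simp only [pvPot, List.map_cons, List.sum_cons]
    by_cases hk : k = n
    · subst hk
      simp only [beq_self_eq_true, if_pos, Option.getD_some]
      have h1 : (k ∈ V) = False := by simp [hn]
      have h2 : k ∈ PySem.Set.add V k := by rw [hmem]; tauto
      simp only [if_pos h2, h1, if_false]
      have := pvPot_mono (adjacency := tl) (V := V) (V' := PySem.Set.add V k)
        (fun y hy => by rw [hmem]; tauto)
      simp only [pvPot] at this
      omega
    · have hbeq : (k == n) = false := by simp [hk]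
      simp only [hbeq, Bool.false_eq_true, if_false]
      have hiff : (k ∈ PySem.Set.add V n) ↔ (k ∈ V) := by rw [hmem]; tauto
      have ih' := ih
      simp only [pvNbrs, pvPot, PySem.Dict.getD_eq_get?_getD] at ih'
      by_cases hv : k ∈ V
      · rw [if_pos (hiff.mpr hv), if_pos hv]; omega
      · rw [if_neg (fun hh => hv (hiff.mp hh)), if_neg hv]; omega

lemma pvPot_le (adjacency : List (String × List String)) (V : PySem.Set String) :
    pvPot adjacency V ≤ (adjacency.map (fun p => p.2.length)).sum := by
  induction adjacency with
  | nil => simp [pvPot]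
  | cons p tl ih =>
    simp only [pvPot, List.map_cons, List.sum_cons] at ih ⊢
    split <;> omega

noncomputable def pvSum (subject_triple_counts : List (String × Int))
    (L : List String) (P : String → Prop) : Int :=
  letI := Classical.decPred P
  ∑ x ∈ L.toFinset.filter P, pvCnt subject_triple_counts x

lemma pvSum_congr {stc : List (String × Int)} {L : List String} {P Q : String → Prop}
    (h : ∀ x ∈ L, (P x ↔ Q x)) : pvSum stc L P = pvSum stc L Q := by
  unfold pvSum
  congr 1
  ext y
  simp only [Finset.mem_filter, List.mem_toFinset]
  exact ⟨fun ⟨hy, hp⟩ => ⟨hy, (h y hy).mp hp⟩, fun ⟨hy, hq⟩ => ⟨hy, (h y hy).mpr hq⟩⟩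

lemma pvSum_false (stc : List (String × Int)) (L : List String) :
    pvSum stc L (fun _ => False) = 0 := by
  unfold pvSum
  rw [Finset.filter_false]
  simp

lemma pvSum_split {stc : List (String × Int)} {L : List String} {P Q : String → Prop} {n : String}
    (hnL : n ∈ L) (hPn : P n) (hQn : ¬ Q n) (hiff : ∀ x ∈ L, (P x ↔ x = n ∨ Q x)) :
    pvSum stc L P = pvCnt stc n + pvSum stc L Q := by
  unfold pvSum
  have hset : (letI := Classical.decPred P; L.toFinset.filter P) =
      insert n (letI := Classical.decPred Q; L.toFinset.filter Q) := by
    ext y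
    simp only [Finset.mem_filter, List.mem_toFinset, Finset.mem_insert]
    constructor
    · rintro ⟨hy, hp⟩
      rcases (hiff y hy).mp hp with h | h
      · exact Or.inl h
      · exact Or.inr ⟨hy, h⟩
    · rintro (rfl | ⟨hy, hq⟩)
      · exact ⟨hnL, hPn⟩
      · exact ⟨hy, (hiff y hy).mpr (Or.inr hq)⟩
  rw [hset, Finset.sum_insert (by simp [Finset.mem_filter, hQn])]

lemma pvSum_nodup {stc : List (String × Int)} {L d : List String}
    (hnd : d.Nodup) (hsub : ∀ x ∈ d, x ∈ L) :
    (d.map (pvCnt stc)).sum = pvSum stc L (fun x => x ∈ d) := by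
  unfold pvSum
  have hset : (letI := Classical.decPred (fun x => x ∈ d); L.toFinset.filter (fun x => x ∈ d)) =
      d.toFinset := by
    ext y
    simp only [Finset.mem_filter, List.mem_toFinset]
    exact ⟨fun h => h.2, fun h => ⟨hsub y h, h⟩⟩
  rw [hset, List.sum_toFinset _ hnd]

def pvReach (adjacency : List (String × List String)) (V : String → Prop)
    (W : List String) (x : String) : Prop :=
  ∃ w ∈ W, Relation.ReflTransGen (pvStep adjacency V) w x

lemma pvLoopA_eq (adjacency : List (String × List String)) (stc : List (String × Int))
    (L : List String) (hflat : ∀ x ∈ pvFlat adjacency, x ∈ L) :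
    ∀ (fuel : Nat) (stack : List String) (V : PySem.Set String) (total : Int),
      stack.length + pvPot adjacency V ≤ fuel →
      (∀ v ∈ V, ∀ m ∈ pvNbrs adjacency v, m ∉ V → m ∈ stack) →
      (∀ x ∈ stack, x ∈ L) →
      pvLoopA adjacency stc fuel stack V total =
        total + pvSum stc L (fun x => pvReach adjacency (· ∈ V) stack x ∧ x ∉ V) := by
  intro fuel
  induction fuel with
  | zero =>
    intro stack V total hfuel hinv hsub
    have hst : stack = [] := List.eq_nil_of_length_eq_zero (by omega)
    subst hst
    rw [pvLoopA]
    rw [pvSum_congr (Q := fun _ => False) (fun x _ => by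
      constructor
      · rintro ⟨⟨w, hw, -⟩, -⟩; simp at hw
      · rintro ⟨⟩)]
    rw [pvSum_false]; ring
  | succ fuel ih =>
    intro stack V total hfuel hinv hsub
    match stack with
    | [] =>
      rw [pvLoopA]
      rw [pvSum_congr (Q := fun _ => False) (fun x _ => by
        constructor
        · rintro ⟨⟨w, hw, -⟩, -⟩; simp at hw
        · rintro ⟨⟩)]
      rw [pvSum_false]; ring
    | node :: rest =>
      by_cases hv : node ∈ V
      · have hred : pvLoopA adjacency stc (fuel + 1) (node :: rest) V total =
            pvLoopA adjacency stc fuel rest V total := by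
          rw [pvLoopA]; rw [if_pos hv]
        rw [hred]
        rw [ih rest V total (by simp at hfuel ⊢; omega)
          (fun v hv' m hm hmV => by
            rcases List.mem_cons.mp (hinv v hv' m hm hmV) with rfl | h
            · exact absurd hv hmV
            · exact h)
          (fun x hx => hsub x (List.mem_cons_of_mem _ hx))]
        congr 1
        refine (pvSum_congr (fun x _ => ?_)).symm
        constructor
        · rintro ⟨⟨w, hw, hr⟩, hxV⟩
          rcases List.mem_cons.mp hw with rfl | hw'
          · rcases Relation.ReflTransGen.cases_head hr with rfl | ⟨c, ⟨hc1, hc2⟩, hrc⟩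
            · exact absurd hv hxV
            · have hc : c ∈ w :: rest := hinv w hv c hc1 hc2
              rcases List.mem_cons.mp hc with rfl | hc'
              · exact absurd hv hc2
              · exact ⟨⟨c, hc', hrc⟩, hxV⟩
          · exact ⟨⟨w, hw', hr⟩, hxV⟩
        · rintro ⟨⟨w, hw, hr⟩, hxV⟩
          exact ⟨⟨w, List.mem_cons_of_mem _ hw, hr⟩, hxV⟩
      · have hred : pvLoopA adjacency stc (fuel + 1) (node :: rest) V total =
            pvLoopA adjacency stc fuel
              ((((pvNbrs adjacency node).filter
                  (fun m => !(PySem.Set.contains (PySem.Set.add V node) m))).reverse) ++ rest)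
              (PySem.Set.add V node) (total + pvCnt stc node) := by
          rw [pvLoopA]; rw [if_neg hv]
        rw [hred]
        set V' := PySem.Set.add V node with hV'
        set pushed := ((pvNbrs adjacency node).filter
          (fun m => !(PySem.Set.contains V' m))).reverse with hpushed
        have hVmem : ∀ y, y ∈ V' ↔ y ∈ V ∨ y = node := fun y => PySem.Set.mem_add V node y
        have hnodeV' : node ∈ V' := (hVmem node).mpr (Or.inr rfl)
        have hpush : ∀ m, m ∈ pushed ↔ m ∈ pvNbrs adjacency node ∧ ¬ m ∈ V' := by
          intro m
          rw [hpushed]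
          simp [List.mem_reverse, List.mem_filter]
        have hfuel' : (pushed ++ rest).length + pvPot adjacency V' ≤ fuel := by
          have h1 : pushed.length ≤ (pvNbrs adjacency node).length := by
            rw [hpushed, List.length_reverse]; exact List.length_filter_le _ _
          have h2 := pvPot_drop (adjacency := adjacency) hv
          rw [← hV'] at h2
          simp only [List.length_append, List.length_cons] at hfuel ⊢
          omega
        have hinv' : ∀ v ∈ V', ∀ m ∈ pvNbrs adjacency v, m ∉ V' → m ∈ pushed ++ rest := by
          intro v hv' m hm hmV'
          rcases (hVmem v).mp hv' with hvV | rfl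
          · have hmV : m ∉ V := fun h => hmV' ((hVmem m).mpr (Or.inl h))
            rcases List.mem_cons.mp (hinv v hvV m hm hmV) with rfl | h
            · exact absurd hnodeV' hmV'
            · exact List.mem_append_right _ h
          · exact List.mem_append_left _ ((hpush m).mpr ⟨hm, hmV'⟩)
        have hsub' : ∀ x ∈ pushed ++ rest, x ∈ L := by
          intro x hx
          rcases List.mem_append.mp hx with h | h
          · exact hflat x (pvNbrs_subset_flat ((hpush x).mp h).1)
          · exact hsub x (List.mem_cons_of_mem _ h)
        rw [ih _ V' _ hfuel' hinv' hsub']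
        have hconvUp : ∀ {a b : String},
            Relation.ReflTransGen (pvStep adjacency (fun y => y ∈ V ∨ y = node)) a b →
            Relation.ReflTransGen (pvStep adjacency (· ∈ V')) a b :=
          fun h => pvRTG_mono (fun y hy => (hVmem y).mp hy) h
        have hconvDown : ∀ {a b : String},
            Relation.ReflTransGen (pvStep adjacency (· ∈ V')) a b →
            Relation.ReflTransGen (pvStep adjacency (· ∈ V)) a b :=
          fun h => pvRTG_mono (fun y hy => (hVmem y).mpr (Or.inl hy)) h
        have hsplit := pvSum_split (stc := stc) (L := L) (n := node)
          (P := fun x => pvReach adjacency (· ∈ V) (node :: rest) x ∧ x ∉ V)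
          (Q := fun x => pvReach adjacency (· ∈ V') (pushed ++ rest) x ∧ x ∉ V')
          (hsub node (List.mem_cons_self))
          ⟨⟨node, List.mem_cons_self, Relation.ReflTransGen.refl⟩, hv⟩
          (fun h => h.2 hnodeV')
          ?_
        · rw [hsplit]; ring
        · intro x hxL
          constructor
          · rintro ⟨⟨w, hw, hr⟩, hxV⟩
            by_cases hxn : x = node
            · exact Or.inl hxn
            · have hxV' : x ∉ V' := fun h => by
                rcases (hVmem x).mp h with h | h
                · exact hxV h
                · exact hxn h
              refine Or.inr ⟨?_, hxV'⟩
              rcases pvThrough (M := fun y => y = node) hr with hL' | ⟨m, rfl, hr'⟩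
              · rcases List.mem_cons.mp hw with rfl | hw'
                · rcases Relation.ReflTransGen.cases_head hL' with rfl | ⟨c, ⟨hc1, hc2⟩, hrc⟩
                  · exact absurd rfl hxn
                  · have hcV' : c ∉ V' := fun h => hc2 ((hVmem c).mp h)
                    exact ⟨c, List.mem_append_left _ ((hpush c).mpr ⟨hc1, hcV'⟩), hconvUp hrc⟩
                · exact ⟨w, List.mem_append_right _ hw', hconvUp hL'⟩
              · rcases Relation.ReflTransGen.cases_head hr' with rfl | ⟨c, ⟨hc1, hc2⟩, hrc⟩
                · exact absurd rfl hxn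
                · have hcV' : c ∉ V' := fun h => hc2 ((hVmem c).mp h)
                  exact ⟨c, List.mem_append_left _ ((hpush c).mpr ⟨hc1, hcV'⟩), hconvUp hrc⟩
          · rintro (rfl | ⟨⟨w, hw, hr⟩, hxV'⟩)
            · exact ⟨⟨x, List.mem_cons_self, Relation.ReflTransGen.refl⟩, hv⟩
            · have hxV : x ∉ V := fun h => hxV' ((hVmem x).mpr (Or.inl h))
              refine ⟨?_, hxV⟩
              rcases List.mem_append.mp hw with hwp | hwr
              · have hwn := (hpush w).mp hwp
                have hwV : ¬ w ∈ V := fun h => hwn.2 ((hVmem w).mpr (Or.inl h))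
                exact ⟨node, List.mem_cons_self,
                  Relation.ReflTransGen.head ⟨hwn.1, hwV⟩ (hconvDown hr)⟩
              · exact ⟨w, List.mem_cons_of_mem _ hwr, hconvDown hr⟩

lemma pvFoldB (ms : List String) :
    ∀ (o : List String) (s : PySem.Set String),
      (∀ x, x ∈ s ↔ x ∈ o) → o.Nodup →
      ∃ app s₂,
        ms.foldl (fun (os : List String × PySem.Set String) m =>
            if PySem.Set.contains os.2 m then os else (os.1 ++ [m], PySem.Set.add os.2 m))
          (o, s) = (o ++ app, s₂) ∧
        (∀ x, x ∈ s₂ ↔ x ∈ o ++ app) ∧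
        (∀ x, x ∈ app ↔ x ∈ ms ∧ x ∉ o) ∧
        (o ++ app).Nodup := by
  induction ms with
  | nil =>
    intro o s hs hnd
    exact ⟨[], s, by simp, by simpa using hs, by simp, by simpa using hnd⟩
  | cons m tl ih =>
    intro o s hs hnd
    rw [List.foldl_cons]
    by_cases hm : m ∈ o
    · have hc : PySem.Set.contains s m = true := by
        rw [PySem.Set.contains_iff]; exact (hs m).mpr hm
      rw [if_pos hc]
      obtain ⟨app, s₂, heq, hs₂, happ, hnd'⟩ := ih o s hs hnd
      refine ⟨app, s₂, heq, hs₂, fun x => ?_, hnd'⟩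
      rw [happ x]
      constructor
      · rintro ⟨hx, hxo⟩; exact ⟨List.mem_cons_of_mem _ hx, hxo⟩
      · rintro ⟨hx, hxo⟩
        rcases List.mem_cons.mp hx with rfl | hx'
        · exact absurd hm hxo
        · exact ⟨hx', hxo⟩
    · rw [if_neg (by
        intro hcontra
        rw [PySem.Set.contains_iff] at hcontra
        exact hm ((hs m).mp hcontra))]
      have hs₁ : ∀ x, x ∈ PySem.Set.add s m ↔ x ∈ o ++ [m] := by
        intro x
        rw [PySem.Set.mem_add]
        simp [hs x]
      have hnd₁ : (o ++ [m]).Nodup := by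
        rw [List.nodup_append]
        exact ⟨hnd, List.nodup_singleton m, by
          simp only [List.mem_singleton]
          rintro a ha b rfl rfl
          exact hm ha⟩
      obtain ⟨app, s₂, heq, hs₂, happ, hnd'⟩ := ih (o ++ [m]) (PySem.Set.add s m) hs₁ hnd₁
      refine ⟨m :: app, s₂, by rw [heq, List.append_assoc]; rfl, by simpa using hs₂, fun x => ?_, by simpa using hnd'⟩
      rw [List.mem_cons, happ x]
      simp only [List.mem_append, List.mem_cons]
      constructor
      · rintro (rfl | ⟨hx, hxo⟩)
        · exact ⟨Or.inl rfl, hm⟩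
        · exact ⟨Or.inr hx, fun h => hxo (Or.inl h)⟩
      · rintro ⟨rfl | hx, hxo⟩
        · exact Or.inl rfl
        · by_cases hxm : x = m
          · exact Or.inl hxm
          · exact Or.inr ⟨hx, by tauto⟩

lemma pvLoopB_eq (adjacency : List (String × List String))
    (L : List String) (hflat : ∀ x ∈ pvFlat adjacency, x ∈ L) :
    ∀ (fuel : Nat) (order : List String) (seen : PySem.Set String) (i : Nat),
      (order.length - i) + 2 * ((L.toFinset \ order.toFinset).card) ≤ fuel →
      order.Nodup → (∀ x ∈ order, x ∈ L) → (∀ x, x ∈ seen ↔ x ∈ order) →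
      (pvLoopB adjacency fuel order seen i).Nodup ∧
      (∀ x ∈ pvLoopB adjacency fuel order seen i, x ∈ L) ∧
      (∀ x, x ∈ pvLoopB adjacency fuel order seen i ↔
        x ∈ order ∨ pvReach adjacency (· ∈ order) (order.drop i) x) := by
  intro fuel
  induction fuel with
  | zero =>
    intro order seen i hfuel hnd hsubL hseen
    have hi : order.length ≤ i := by omega
    rw [pvLoopB]
    refine ⟨hnd, hsubL, fun x => ?_⟩
    rw [List.drop_eq_nil_of_le hi]
    constructor
    · exact Or.inl
    · rintro (h | ⟨w, hw, -⟩)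
      · exact h
      · simp at hw
  | succ fuel ih =>
    intro order seen i hfuel hnd hsubL hseen
    by_cases h : i < order.length
    · have hred : pvLoopB adjacency (fuel + 1) order seen i =
          pvLoopB adjacency fuel
            ((pvNbrs adjacency order[i]).foldl
              (fun (os : List String × PySem.Set String) m =>
                if PySem.Set.contains os.2 m then os else (os.1 ++ [m], PySem.Set.add os.2 m))
              (order, seen)).1
            ((pvNbrs adjacency order[i]).foldl
              (fun (os : List String × PySem.Set String) m =>
                if PySem.Set.contains os.2 m then os else (os.1 ++ [m], PySem.Set.add os.2 m))
              (order, seen)).2 (i + 1) := by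
        rw [pvLoopB]; rw [dif_pos h]
      obtain ⟨app, s₂, heq, hs₂, happ, hnd'⟩ :=
        pvFoldB (pvNbrs adjacency order[i]) order seen hseen hnd
      rw [hred, heq]
      have happL : ∀ x ∈ app, x ∈ L :=
        fun x hx => hflat x (pvNbrs_subset_flat ((happ x).mp hx).1)
      have happdisj : ∀ x ∈ app, x ∉ order := fun x hx => ((happ x).mp hx).2
      have happnd : app.Nodup := (List.nodup_append.mp hnd').2.1
      have hsubL' : ∀ x ∈ order ++ app, x ∈ L := by
        intro x hx
        rcases List.mem_append.mp hx with h1 | h1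
        · exact hsubL x h1
        · exact happL x h1
      have hfuel' : ((order ++ app).length - (i + 1)) +
          2 * ((L.toFinset \ (order ++ app).toFinset).card) ≤ fuel := by
        have hsd : (L.toFinset \ (order ++ app).toFinset) =
            (L.toFinset \ order.toFinset) \ app.toFinset := by
          ext y; simp; tauto
        have hsubdiff : app.toFinset ⊆ L.toFinset \ order.toFinset := by
          intro y hy
          rw [List.mem_toFinset] at hy
          rw [Finset.mem_sdiff, List.mem_toFinset, List.mem_toFinset]
          exact ⟨happL y hy, happdisj y hy⟩
        have hcard : ((L.toFinset \ order.toFinset) \ app.toFinset).card =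
            (L.toFinset \ order.toFinset).card - app.toFinset.card := by
          rw [Finset.card_sdiff, Finset.inter_eq_left.mpr hsubdiff]
        have hlen : app.toFinset.card = app.length := List.toFinset_card_of_nodup happnd
        have hle : app.toFinset.card ≤ (L.toFinset \ order.toFinset).card :=
          Finset.card_le_card hsubdiff
        rw [hsd, hcard, hlen]
        simp only [List.length_append]
        omega
      obtain ⟨ih1, ih2, ih3⟩ := ih (order ++ app) s₂ (i + 1) hfuel' hnd' hsubL' hs₂
      refine ⟨ih1, ih2, fun x => ?_⟩
      rw [ih3 x]
      have hdrop : order.drop i = order[i] :: order.drop (i + 1) :=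
        List.drop_eq_getElem_cons h
      have hdrop' : (order ++ app).drop (i + 1) = order.drop (i + 1) ++ app :=
        List.drop_append_of_le_length (by omega)
      have hOmem : ∀ y, y ∈ order ++ app ↔ y ∈ order ∨ y ∈ app := fun y => List.mem_append
      have hni : order[i] ∈ order := List.getElem_mem h
      constructor
      · rintro (hxo | ⟨w, hw, hr⟩)
        · rcases (hOmem x).mp hxo with h1 | h1
          · exact Or.inl h1
          · -- x freshly appended: one step from order[i]
            have hx := (happ x).mp h1
            exact Or.inr ⟨order[i], hdrop ▸ List.mem_cons_self,
              Relation.ReflTransGen.single ⟨hx.1, hx.2⟩⟩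
        · -- a path in the new state maps to a path in the old state
          have hr' : Relation.ReflTransGen (pvStep adjacency (· ∈ order)) w x :=
            pvRTG_mono (fun y hy => (hOmem y).mpr (Or.inl hy)) hr
          rw [hdrop'] at hw
          rcases List.mem_append.mp hw with h1 | h1
          · exact Or.inr ⟨w, hdrop ▸ List.mem_cons_of_mem _ h1, hr'⟩
          · have hwn := (happ w).mp h1
            exact Or.inr ⟨order[i], hdrop ▸ List.mem_cons_self,
              Relation.ReflTransGen.head ⟨hwn.1, hwn.2⟩ hr'⟩
      · rintro (hxo | ⟨w, hw, hr⟩)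
        · exact Or.inl ((hOmem x).mpr (Or.inl hxo))
        · rcases pvThrough (M := fun y => y ∈ app) hr with hL' | ⟨m, hmapp, hr'⟩
          · rw [hdrop] at hw
            rcases List.mem_cons.mp hw with rfl | hw'
            · rcases Relation.ReflTransGen.cases_head hL' with rfl | ⟨c, ⟨hc1, hc2⟩, hrc⟩
              · exact Or.inl ((hOmem _).mpr (Or.inl hni))
              · exfalso
                have : c ∈ app := (happ c).mpr ⟨hc1, fun hc => hc2 (Or.inl hc)⟩
                exact hc2 (Or.inr this)
            · exact Or.inr ⟨w, hdrop' ▸ List.mem_append_left _ hw',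
                pvRTG_mono (fun y hy => (hOmem y).mp hy) hL'⟩
          · exact Or.inr ⟨m, hdrop' ▸ List.mem_append_right _ hmapp,
              pvRTG_mono (fun y hy => (hOmem y).mp hy) hr'⟩
    · have hred : pvLoopB adjacency (fuel + 1) order seen i = order := by
        rw [pvLoopB]; rw [dif_neg h]
      rw [hred]
      refine ⟨hnd, hsubL, fun x => ?_⟩
      rw [List.drop_eq_nil_of_le (by omega)]
      constructor
      · exact Or.inl
      · rintro (h1 | ⟨w, hw, -⟩)
        · exact h1
        · simp at hw

def pvUniv (subject : String) (adjacency : List (String × List String)) : List String :=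
  subject :: pvFlat adjacency

lemma pvFlat_length (adjacency : List (String × List String)) :
    (pvFlat adjacency).length = (adjacency.map (fun p => p.2.length)).sum := by
  simp [pvFlat, List.length_flatten, List.map_map, Function.comp_def]

lemma pvEmpty_not_mem (x : String) : x ∉ (PySem.Set.empty : PySem.Set String) := by
  simp [PySem.Set.empty]

theorem pvMain (subject : String) (adjacency : List (String × List String))
    (stc : List (String × Int)) :
    count_recursive_using_index_py subject adjacency stc =
      count_recursive_using_index_py_alt subject adjacency stc := by
  unfold count_recursive_using_index_py count_recursive_using_index_py_alt
  have hA := pvLoopA_eq adjacency stc (pvUniv subject adjacency)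
    (fun x hx => List.mem_cons_of_mem _ hx)
    (1 + (adjacency.map (fun p => p.2.length)).sum) [subject] PySem.Set.empty 0
    (by
      have := pvPot_le adjacency PySem.Set.empty
      simp only [List.length_singleton]
      omega)
    (fun v hv => absurd hv (pvEmpty_not_mem v))
    (fun x hx => by
      rw [List.mem_singleton] at hx
      exact hx ▸ List.mem_cons_self)
  obtain ⟨hndO, hsubO, hiffO⟩ := pvLoopB_eq adjacency (pvUniv subject adjacency)
    (fun x hx => List.mem_cons_of_mem _ hx)
    (1 + 2 * (adjacency.map (fun p => p.2.length)).sum) [subject]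
    (PySem.Set.ofList [subject]) 0
    (by
      have hsub : (pvUniv subject adjacency).toFinset \ [subject].toFinset ⊆
          (pvFlat adjacency).toFinset := by
        intro y hy
        rw [Finset.mem_sdiff, List.mem_toFinset, List.mem_toFinset] at hy
        rw [List.mem_toFinset]
        rcases List.mem_cons.mp hy.1 with rfl | hf
        · exact absurd (List.mem_singleton_self _) hy.2
        · exact hf
      have h1 := Finset.card_le_card hsub
      have h2 := List.toFinset_card_le (pvFlat adjacency)
      have h3 := pvFlat_length adjacency
      simp only [List.length_singleton]
      omega)
    (List.nodup_singleton subject)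
    (fun x hx => by
      rw [List.mem_singleton] at hx
      exact hx ▸ List.mem_cons_self)
    (fun x => PySem.Set.mem_ofList [subject] x)
  rw [hA, pvSum_nodup hndO hsubO, zero_add]
  apply pvSum_congr
  intro x hxU
  rw [hiffO x, List.drop_zero]
  constructor
  · rintro ⟨⟨w, hw, hr⟩, -⟩
    rw [List.mem_singleton] at hw
    subst hw
    right
    rcases pvThrough (M := fun y => y ∈ [w]) hr with hL' | ⟨m, hm, hr'⟩
    · exact ⟨w, List.mem_singleton_self w,
        pvRTG_mono (fun y hy => Or.inr hy) hL'⟩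
    · rw [List.mem_singleton] at hm
      subst hm
      exact ⟨m, List.mem_singleton_self m,
        pvRTG_mono (fun y hy => Or.inr hy) hr'⟩
  · rintro (hxs | ⟨w, hw, hr⟩)
    · rw [List.mem_singleton] at hxs
      exact ⟨⟨x, hxs ▸ List.mem_singleton_self subject, Relation.ReflTransGen.refl⟩,
        pvEmpty_not_mem x⟩
    · exact ⟨⟨w, hw, pvRTG_mono (fun y hy => absurd hy (pvEmpty_not_mem y)) hr⟩,
        pvEmpty_not_mem x⟩

-- ===== VERDICT (by name: the statement is the Claim_ definition above) =====
theorem count_recursive_using_index_py_spec : Claim_equal_count_recursive_using_index_py := by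
  intro subject adjacency subject_triple_counts _
  unfold Spec_count_recursive_using_index_py
  exact pvMain subject adjacency subject_triple_counts
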